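-- pv_equiv track=rewrite | github.com/tombackert/game-theory | strategies.py | gradual_tit_for_tat
-- ===== SOURCE A (Python) =====
-- def gradual_tit_for_tat(results, player_index):
--     if not results:
--         return 'C'
--     defection_count = 0
--     for result in results:
--         if result[1 - player_index] == 'D':
--             defection_count += 1
--     if defection_count == 0:
--         return 'C'
--     elif results[-1][1 - player_index] == 'D':
--         return 'D'
--     return 'C'
-- ===== SOURCE B (Python) =====
-- def gradual_tit_for_tat(results, player_index):
--     move = 'C'
--     for result in results:
--         move = result[1 - player_index]
--     return 'D' if move == 'D' else 'C'
-- ===== Notes on version B (the rewrite author's own statement) =====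
-- stated objective: simpler
-- what changed: B replaces A's defection counter plus negative-index peek at the last round by one fold that keeps overwriting the opponent's last-seen move and answers from that alone (a 'D' last move already implies the count was positive), with no emptiness guard.
import Mathlib
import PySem

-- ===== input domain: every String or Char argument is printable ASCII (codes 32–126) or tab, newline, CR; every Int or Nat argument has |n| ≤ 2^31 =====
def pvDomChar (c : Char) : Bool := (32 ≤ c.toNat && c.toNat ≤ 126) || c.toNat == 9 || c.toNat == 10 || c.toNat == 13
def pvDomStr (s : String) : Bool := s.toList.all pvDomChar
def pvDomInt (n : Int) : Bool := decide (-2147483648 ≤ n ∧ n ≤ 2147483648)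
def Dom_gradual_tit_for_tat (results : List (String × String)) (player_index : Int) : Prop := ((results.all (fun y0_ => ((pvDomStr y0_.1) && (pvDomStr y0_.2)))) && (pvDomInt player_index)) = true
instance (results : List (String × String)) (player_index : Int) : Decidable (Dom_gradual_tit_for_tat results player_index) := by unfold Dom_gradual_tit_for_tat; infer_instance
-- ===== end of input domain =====

-- B replaces A's defection counter and negative-index peek at the last round by a single fold
-- that keeps overwriting the opponent's last-seen move (objective: simpler, same O(n) cost).

-- ===== PORT A =====
-- result[1 - player_index] on a 2-tuple, Python's negative-index rule (exact via PySem.List.pyGet?;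
-- the .getD "" default is only reached outside Pre_)
def pvOppA (result : String × String) (player_index : Int) : String :=
  (PySem.List.pyGet? [result.1, result.2] (1 - player_index)).getD ""

def gradual_tit_for_tat (results : List (String × String)) (player_index : Int) : String :=
  if results = [] then "C"
  else
    let defection_count : Int :=
      results.foldl (fun acc result => if pvOppA result player_index = "D" then acc + 1 else acc) 0
    if defection_count = 0 then "C"
    else if pvOppA ((PySem.List.pyGet? results (-1)).getD ("", "")) player_index = "D" then "D"
    else "C"

-- ===== PORT B =====
def gradual_tit_for_tat_alt (results : List (String × String)) (player_index : Int) : String :=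
  let move : String :=
    results.foldl (fun _ result => (PySem.List.pyGet? [result.1, result.2] (1 - player_index)).getD "") "C"
  if move = "D" then "D" else "C"

-- ===== PRECONDITION & SPEC =====
-- Pre_ excludes exactly the inputs where Python raises IndexError: a nonempty history with
-- player_index outside {0,1,2,3} (tuple index 1-player_index outside the -2..1 range); both A and B raise there.
def Pre_gradual_tit_for_tat (results : List (String × String)) (player_index : Int) : Prop :=
  results = [] ∨ (0 ≤ player_index ∧ player_index ≤ 3)
instance (results : List (String × String)) (player_index : Int) : Decidable (Pre_gradual_tit_for_tat results player_index) := by unfold Pre_gradual_tit_for_tat; infer_instance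

def pvWitness_gradual_tit_for_tat : (List (String × String)) × Int := ([("C", "D"), ("D", "C")], 0)

def Spec_gradual_tit_for_tat (results : List (String × String)) (player_index : Int) (out : String) : Prop := out = gradual_tit_for_tat_alt results player_index
instance (results : List (String × String)) (player_index : Int) (out : String) : Decidable (Spec_gradual_tit_for_tat results player_index out) := by unfold Spec_gradual_tit_for_tat; infer_instance

-- ===== CLAIM (what is proved, stated in full; the proofs are below) =====
def Claim_equal_gradual_tit_for_tat : Prop := ∀ (results : List (String × String)) (player_index : Int), Dom_gradual_tit_for_tat results player_index → Pre_gradual_tit_for_tat results player_index → Spec_gradual_tit_for_tat results player_index (gradual_tit_for_tat results player_index)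

-- ===== LEMMAS AND PROOFS =====

-- the counting fold never decreases its accumulator
theorem pv_foldl_ge (results : List (String × String)) (player_index : Int) (acc : Int) :
    acc ≤ results.foldl (fun acc result => if pvOppA result player_index = "D" then acc + 1 else acc) acc := by
  induction results generalizing acc with
  | nil => simp
  | cons r rs ih =>
    simp only [List.foldl_cons]
    split
    · exact le_trans (by omega) (ih (acc + 1))
    · exact ih acc

-- if some member's opponent move is "D", the count starting from acc exceeds acc
theorem pv_foldl_pos (results : List (String × String)) (player_index : Int) (r : String × String)
    (hr : r ∈ results) (hD : pvOppA r player_index = "D") (acc : Int) :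
    acc < results.foldl (fun acc result => if pvOppA result player_index = "D" then acc + 1 else acc) acc := by
  induction results generalizing acc with
  | nil => cases hr
  | cons x xs ih =>
    simp only [List.foldl_cons]
    rcases List.mem_cons.mp hr with h | h
    · subst h
      rw [if_pos hD]
      exact lt_of_lt_of_le (by omega) (pv_foldl_ge xs player_index (acc + 1))
    · split
      · exact lt_trans (by omega) (ih h (acc + 1))
      · exact ih h acc

-- B's overwriting fold computes the value of its function at the last element
theorem pv_foldl_overwrite {α β : Type} (g : α → β) (l : List α) (x : α) (init : β) :
    (x :: l).foldl (fun _ r => g r) init = g ((x :: l).getLast (by simp)) := by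
  induction l generalizing x init with
  | nil => simp
  | cons y ys ih =>
    rw [List.foldl_cons]
    rw [ih y (g x)]
    simp

-- ===== VERDICT (by name: the statement is the Claim_ definition above) =====
theorem gradual_tit_for_tat_spec : Claim_equal_gradual_tit_for_tat := by
  intro results player_index _ _
  unfold Spec_gradual_tit_for_tat gradual_tit_for_tat gradual_tit_for_tat_alt
  match results with
  | [] => simp
  | x :: xs =>
    simp only [if_neg (List.cons_ne_nil x xs)]
    have hlastmem : (x :: xs).getLast (by simp) ∈ x :: xs := List.getLast_mem _
    have hget : (PySem.List.pyGet? (x :: xs) (-1)).getD ("", "") = (x :: xs).getLast (by simp) := by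
      rw [PySem.List.pyGet?_neg_one, List.getLast?_eq_getLast_of_ne_nil (by simp)]
      rfl
    have hB : List.foldl (fun _ result => (PySem.List.pyGet? [result.1, result.2] (1 - player_index)).getD "") "C" (x :: xs)
        = pvOppA ((x :: xs).getLast (by simp)) player_index :=
      pv_foldl_overwrite (fun result : String × String => (PySem.List.pyGet? [result.1, result.2] (1 - player_index)).getD "") xs x "C"
    rw [hB, hget]
    by_cases hD : pvOppA ((x :: xs).getLast (by simp)) player_index = "D"
    · have hpos := pv_foldl_pos (x :: xs) player_index _ hlastmem hD 0
      rw [if_neg (by omega), if_pos hD]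
    · rw [if_neg hD]
      split <;> rfl
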